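-- pv_equiv track=rewrite | github.com/Akgop/Problem-Solving | Greedy/baekjoon_16953_AtoB.py | solution
-- ===== SOURCE A (Python) =====
-- def solution(a, b):
--     answer = -1
--     cnt = 1
--     while b > a:
--         if b % 2 == 0:
--             b //= 2
--             cnt += 1
--         elif b % 10 == 1:
--             b -= 1
--             b //= 10
--             cnt += 1
--         else:
--             break
--     if a == b:
--         answer = cnt
--     return answer
-- ===== SOURCE B (Python) =====
-- def solution(a, b):
--     # Forward search from a toward b using the two operations (x*2, x*10+1).
--     # Only one branch can ever reach b (a value cannot be both even and end in 1),
--     # so the first successful branch gives the unique count.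
--     def f(x):
--         if x == b:
--             return 1
--         if x > b or x < 1:
--             return -1
--         r = f(2 * x)
--         if r != -1:
--             return r + 1
--         r = f(10 * x + 1)
--         return r + 1 if r != -1 else -1
--     return f(a)
-- ===== Notes on version B (the rewrite author's own statement) =====
-- stated objective: alternative
-- what changed: Replaced A's backward greedy while-loop that reduces b (halve if even, strip a trailing 1) by a forward recursive search from a that tries both operations x*2 and x*10+1 and returns 1 plus the count of the unique branch reaching b.
-- outside the precondition, e.g. on solution(0, 2): A returns 3, B returns -1; on solution(-1, 2): A does not finish within the time limit, B returns -1
import Mathlib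
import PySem

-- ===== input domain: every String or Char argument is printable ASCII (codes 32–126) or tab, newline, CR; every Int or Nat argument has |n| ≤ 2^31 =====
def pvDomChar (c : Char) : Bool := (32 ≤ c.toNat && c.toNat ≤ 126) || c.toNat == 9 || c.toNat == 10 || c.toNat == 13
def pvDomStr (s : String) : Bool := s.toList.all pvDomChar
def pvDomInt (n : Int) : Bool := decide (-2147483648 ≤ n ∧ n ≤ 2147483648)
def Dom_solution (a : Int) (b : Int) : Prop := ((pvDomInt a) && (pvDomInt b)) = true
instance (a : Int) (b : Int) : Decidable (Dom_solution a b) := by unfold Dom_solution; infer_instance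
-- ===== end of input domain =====

-- B replaces A's backward greedy loop from b by a forward recursive search from a
-- trying both operations; alternative decomposition, not claimed faster.

-- ===== PORT A =====
-- the while loop; fuel b.natAbs+1 suffices on Pre_ (each iteration moves b strictly
-- toward the exit while |b| decreases); returns the final (b, cnt)
def loopA : Nat → Int → Int → Int → Int × Int
  | 0, _, b, cnt => (b, cnt)
  | fuel+1, a, b, cnt =>
    if a < b then
      if PySem.Int.mod b 2 = 0 then
        loopA fuel a (PySem.Int.floordiv b 2) (cnt + 1)
      else if PySem.Int.mod b 10 = 1 then
        loopA fuel a (PySem.Int.floordiv (b - 1) 10) (cnt + 1)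
      else (b, cnt)
    else (b, cnt)

def solution (a : Int) (b : Int) : Int :=
  let r := loopA (b.natAbs + 1) a b 1
  if a = r.1 then r.2 else -1

-- ===== PORT B =====
-- forward search from x toward b via the two operations; the Nat fuel is only a
-- totality guard: (b - x).toNat strictly decreases, so (b - x).toNat + 1 always suffices
def fBgo : Nat → Int → Int → Int
  | 0, _, _ => -1
  | fuel + 1, b, x =>
    if x = b then 1
    else if b < x ∨ x < 1 then -1
    else
      let r := fBgo fuel b (2 * x)
      if r ≠ -1 then r + 1
      else
        let r2 := fBgo fuel b (10 * x + 1)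
        if r2 ≠ -1 then r2 + 1 else -1

def fB (b : Int) (x : Int) : Int := fBgo ((b - x).toNat + 1) b x

def solution_alt (a : Int) (b : Int) : Int := fB b a

-- ===== PRECONDITION & SPEC =====
-- Pre_ excludes a ≤ 0 < b with a < b: outside the problem's guaranteed domain 1 ≤ A;
-- there A diverges for some b (its loop sticks at b = 0, e.g. a = -1, b = 2) and for
-- a = 0 returns counts from chains ending at 0 that a forward search cannot reach.
def Pre_solution (a : Int) (b : Int) : Prop := 1 ≤ a ∨ b ≤ a ∨ b < 0
instance (a : Int) (b : Int) : Decidable (Pre_solution a b) := by unfold Pre_solution; infer_instance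

def pvWitness_solution : Int × Int := (1, 10)

def Spec_solution (a : Int) (b : Int) (out : Int) : Prop := out = solution_alt a b
instance (a : Int) (b : Int) (out : Int) : Decidable (Spec_solution a b out) := by unfold Spec_solution; infer_instance

-- ===== CLAIM (what is proved, stated in full; the proofs are below) =====
def Claim_equal_solution : Prop := ∀ (a : Int) (b : Int), Dom_solution a b → Pre_solution a b → Spec_solution a b (solution a b)

-- ===== LEMMAS AND PROOFS =====

-- any two sufficient fuels agree
theorem fBgo_congr (b : Int) :
    ∀ (f1 f2 : Nat) (x : Int), (b - x).toNat < f1 → (b - x).toNat < f2 →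
      fBgo f1 b x = fBgo f2 b x := by
  intro f1
  induction f1 with
  | zero => intro f2 x h1 h2; omega
  | succ f1 ih =>
    intro f2 x h1 h2
    obtain ⟨k, rfl⟩ : ∃ k, f2 = k + 1 := ⟨f2 - 1, by omega⟩
    simp only [fBgo]
    by_cases hxb : x = b
    · rw [if_pos hxb, if_pos hxb]
    · rw [if_neg hxb, if_neg hxb]
      by_cases hg : b < x ∨ x < 1
      · rw [if_pos hg, if_pos hg]
      · rw [if_neg hg, if_neg hg]
        rw [ih k (2 * x) (by omega) (by omega), ih k (10 * x + 1) (by omega) (by omega)]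

theorem fB_self (b : Int) : fB b b = 1 := by
  unfold fB
  simp [fBgo]

theorem fB_out (b x : Int) (hg : b < x ∨ x < 1) (hxb : x ≠ b) : fB b x = -1 := by
  unfold fB
  conv_lhs => rw [fBgo]
  rw [if_neg hxb, if_pos hg]

theorem fB_gt (b x : Int) (h : b < x) : fB b x = -1 :=
  fB_out b x (Or.inl h) (by omega)

theorem fB_mid (b x : Int) (h1 : 1 ≤ x) (h2 : x < b) :
    fB b x = (if fB b (2 * x) ≠ -1 then fB b (2 * x) + 1
      else if fB b (10 * x + 1) ≠ -1 then fB b (10 * x + 1) + 1 else -1) := by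
  unfold fB
  conv_lhs => rw [fBgo]
  rw [if_neg (by omega), if_neg (by omega)]
  rw [fBgo_congr b ((b - x).toNat) ((b - 2 * x).toNat + 1) (2 * x) (by omega) (by omega)]
  rw [fBgo_congr b ((b - x).toNat) ((b - (10 * x + 1)).toNat + 1) (10 * x + 1) (by omega) (by omega)]

-- fB returns -1 or a positive count
theorem fB_lb (b : Int) : ∀ (n : Nat) (x : Int), (b - x).toNat ≤ n → fB b x = -1 ∨ 1 ≤ fB b x := by
  intro n
  induction n with
  | zero =>
    intro x hn
    rcases eq_or_lt_of_le (by omega : b ≤ x) with h | h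
    · rw [← h, fB_self]; right; norm_num
    · rw [fB_gt b x h]; left; rfl
  | succ n ih =>
    intro x hn
    by_cases hxb : x = b
    · rw [hxb, fB_self]; right; norm_num
    · by_cases hg : b < x ∨ x < 1
      · rw [fB_out b x hg hxb]; left; rfl
      · have hx1 : 1 ≤ x := by omega
        have hxlt : x < b := by omega
        rw [fB_mid b x hx1 hxlt]
        have c1 := ih (2 * x) (by omega)
        have c2 := ih (10 * x + 1) (by omega)
        split_ifs <;> omega

-- one backward greedy step on b corresponds to +1 on every forward count
theorem fB_step (b p : Int) (hp : 1 ≤ p) (hbp : b = 2 * p ∨ b = 10 * p + 1) :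
    ∀ (n : Nat) (x : Int), (b - x).toNat ≤ n → 1 ≤ x → x < b →
      fB b x = (if fB p x = -1 then -1 else fB p x + 1) := by
  intro n
  induction n with
  | zero => intro x hn h1 h2; omega
  | succ n ih =>
    intro x hn h1 h2
    rw [fB_mid b x h1 h2]
    rcases lt_trichotomy x p with hxp | hxp | hxp
    · -- x < p : both children relate by ih
      have hc1 : fB b (2 * x) = (if fB p (2 * x) = -1 then -1 else fB p (2 * x) + 1) := by
        apply ih (2 * x) (by omega) (by omega) (by omega)
      have hc2 : fB b (10 * x + 1) = (if fB p (10 * x + 1) = -1 then -1 else fB p (10 * x + 1) + 1) := by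
        rcases lt_trichotomy (10 * x + 1) b with h | h | h
        · exact ih (10 * x + 1) (by omega) (by omega) h
        · exfalso; omega
        · rw [fB_gt b _ h, fB_gt p _ (by omega)]; simp
      rw [fB_mid p x h1 hxp, hc1, hc2]
      have l1 := fB_lb p (p - 2 * x).toNat (2 * x) le_rfl
      have l2 := fB_lb p (p - (10 * x + 1)).toNat (10 * x + 1) le_rfl
      split_ifs <;> omega
    · -- x = p : exactly one child is b
      subst hxp
      rcases hbp with hb | hb
      · have hc1 : fB b (2 * x) = 1 := by rw [← hb]; exact fB_self b
        rw [fB_self]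
        simp [hc1]
      · have hc1 : fB b (2 * x) = -1 := by
          have := ih (2 * x) (by omega) (by omega) (by omega)
          rw [this, fB_gt x (2 * x) (by omega)]
          simp
        have hc2 : fB b (10 * x + 1) = 1 := by rw [← hb]; exact fB_self b
        rw [fB_self]
        simp [hc1, hc2]
    · -- p < x < b : nothing reachable
      have hrhs : fB p x = -1 := fB_gt p x hxp
      have hc1 : fB b (2 * x) = -1 := by
        rcases lt_trichotomy (2 * x) b with h | h | h
        · rw [ih (2 * x) (by omega) (by omega) h, fB_gt p (2 * x) (by omega)]; simp
        · exfalso; omega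
        · exact fB_gt b _ h
      have hc2 : fB b (10 * x + 1) = -1 := by
        rcases lt_trichotomy (10 * x + 1) b with h | h | h
        · rw [ih (10 * x + 1) (by omega) (by omega) h, fB_gt p (10 * x + 1) (by omega)]; simp
        · exfalso; omega
        · exact fB_gt b _ h
      rw [hrhs, hc1, hc2]
      simp

-- a stuck b (odd, not ending in 1) is reachable from no x < b
theorem fB_stuck (b : Int) (h2 : ¬ b % 2 = 0) (h10 : ¬ b % 10 = 1) :
    ∀ (n : Nat) (x : Int), (b - x).toNat ≤ n → 1 ≤ x → x < b → fB b x = -1 := by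
  intro n
  induction n with
  | zero => intro x hn h1 hlt; omega
  | succ n ih =>
    intro x hn h1 hlt
    rw [fB_mid b x h1 hlt]
    have hc1 : fB b (2 * x) = -1 := by
      rcases lt_trichotomy (2 * x) b with h | h | h
      · exact ih (2 * x) (by omega) (by omega) h
      · exfalso; omega
      · exact fB_gt b _ h
    have hc2 : fB b (10 * x + 1) = -1 := by
      rcases lt_trichotomy (10 * x + 1) b with h | h | h
      · exact ih (10 * x + 1) (by omega) (by omega) h
      · exfalso; omega
      · exact fB_gt b _ h
    rw [hc1, hc2]
    simp

-- on a < b < 0 the loop never lands on a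
theorem loopA_neg (a : Int) :
    ∀ (fuel : Nat) (b cnt : Int), b < 0 → a < b → a ≠ (loopA fuel a b cnt).1 := by
  intro fuel
  induction fuel with
  | zero => intro b cnt hb hab; simpa using (by omega : a ≠ b)
  | succ k ih =>
    intro b cnt hb hab
    have m2 : PySem.Int.mod b 2 = b % 2 := PySem.Int.mod_eq_emod_of_pos (by norm_num)
    have m10 : PySem.Int.mod b 10 = b % 10 := PySem.Int.mod_eq_emod_of_pos (by norm_num)
    have d2 : PySem.Int.floordiv b 2 = b / 2 := PySem.Int.floordiv_eq_ediv_of_pos (by norm_num)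
    have d10 : PySem.Int.floordiv (b - 1) 10 = (b - 1) / 10 := PySem.Int.floordiv_eq_ediv_of_pos (by norm_num)
    simp only [loopA, m2, m10, d2, d10]
    rw [if_pos hab]
    by_cases h2 : b % 2 = 0
    · rw [if_pos h2]
      exact ih (b / 2) (cnt + 1) (by omega) (by omega)
    · rw [if_neg h2]
      by_cases h10 : b % 10 = 1
      · rw [if_pos h10]
        exact ih ((b - 1) / 10) (cnt + 1) (by omega) (by omega)
      · rw [if_neg h10]
        simpa using (by omega : a ≠ b)

-- the main invariant: A's loop result equals the forward count, shifted by the accumulator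
theorem loopA_main (a : Int) (ha : 1 ≤ a) :
    ∀ (n : Nat) (b cnt : Int) (fuel : Nat), b.toNat ≤ n → b.toNat < fuel →
      (if a = (loopA fuel a b cnt).1 then (loopA fuel a b cnt).2 else -1)
        = (if fB b a = -1 then -1 else fB b a + (cnt - 1)) := by
  intro n
  induction n with
  | zero =>
    intro b cnt fuel hn hf
    obtain ⟨k, rfl⟩ : ∃ k, fuel = k + 1 := ⟨fuel - 1, by omega⟩
    have hba : ¬ a < b := by omega
    simp only [loopA, if_neg hba]
    rw [if_neg (by omega : ¬ a = b), fB_gt b a (by omega)]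
    simp
  | succ n ih =>
    intro b cnt fuel hn hf
    obtain ⟨k, rfl⟩ : ∃ k, fuel = k + 1 := ⟨fuel - 1, by omega⟩
    by_cases hba : a < b
    · have m2 : PySem.Int.mod b 2 = b % 2 := PySem.Int.mod_eq_emod_of_pos (by norm_num)
      have m10 : PySem.Int.mod b 10 = b % 10 := PySem.Int.mod_eq_emod_of_pos (by norm_num)
      have d2 : PySem.Int.floordiv b 2 = b / 2 := PySem.Int.floordiv_eq_ediv_of_pos (by norm_num)
      have d10 : PySem.Int.floordiv (b - 1) 10 = (b - 1) / 10 := PySem.Int.floordiv_eq_ediv_of_pos (by norm_num)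
      simp only [loopA, m2, m10, d2, d10, if_pos hba]
      by_cases h2 : b % 2 = 0
      · rw [if_pos h2]
        set p := b / 2 with hpdef
        have hb2 : b = 2 * p := by omega
        have hp : 1 ≤ p := by omega
        have hrec := ih p (cnt + 1) k (by omega) (by omega)
        rw [hrec]
        have hstep := fB_step b p hp (Or.inl hb2) (b - a).toNat a le_rfl ha hba
        rw [hstep]
        have l := fB_lb p (p - a).toNat a le_rfl
        split_ifs <;> omega
      · rw [if_neg h2]
        by_cases h10 : b % 10 = 1
        · rw [if_pos h10]
          set p := (b - 1) / 10 with hpdef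
          have hb10 : b = 10 * p + 1 := by omega
          have hp : 1 ≤ p := by omega
          have hrec := ih p (cnt + 1) k (by omega) (by omega)
          rw [hrec]
          have hstep := fB_step b p hp (Or.inr hb10) (b - a).toNat a le_rfl ha hba
          rw [hstep]
          have l := fB_lb p (p - a).toNat a le_rfl
          split_ifs <;> omega
        · rw [if_neg h10]
          rw [if_neg (by omega : ¬ a = b)]
          rw [fB_stuck b h2 h10 (b - a).toNat a le_rfl ha hba]
          simp
    · simp only [loopA, if_neg hba]
      by_cases hab : a = b
      · subst hab
        rw [fB_self]
        have h1 : ¬ (1 : Int) = -1 := by norm_num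
        rw [if_neg h1, if_pos rfl]
        omega
      · rw [if_neg hab, fB_gt b a (by omega)]
        simp

-- ===== VERDICT (by name: the statement is the Claim_ definition above) =====
theorem solution_spec : Claim_equal_solution := by
  intro a b _ hpre
  unfold Spec_solution solution solution_alt
  by_cases hba : a < b
  · have ha : 1 ≤ a ∨ b < 0 := by
      rcases hpre with h | h | h
      · exact Or.inl h
      · omega
      · exact Or.inr h
    rcases ha with ha | hb
    · have := loopA_main a ha b.toNat b 1 (b.natAbs + 1) le_rfl (by omega)
      rw [this]
      split_ifs <;> omega
    · have hneq := loopA_neg a (b.natAbs + 1) b 1 hb hba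
      rw [if_neg hneq]
      exact (fB_out b a (Or.inr (by omega)) (by omega)).symm
  · obtain ⟨k, hk⟩ : ∃ k, b.natAbs + 1 = k + 1 := ⟨b.natAbs, rfl⟩
    rw [hk]
    simp only [loopA, if_neg hba]
    by_cases hab : a = b
    · subst hab
      rw [if_pos rfl, fB_self]
    · rw [if_neg hab, fB_gt b a (by omega)]
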